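-- pv_equiv track=rewrite | github.com/Replit-is-bad/Joel-CT08-Fri-530pm | CT08_06/project6_grading.py | find_the_highest_scorer
-- ===== SOURCE A (Python) =====
-- def find_the_highest_scorer(quiz_score):
--     highest_score = 0
--     highest_scorers = []
--     for name, score in quiz_score.items():
--
--         if score > highest_score:
--             highest_score = score
--
--     for name, score in quiz_score.items():
--         if score == highest_score:
--             highest_scorers.append(name)
--
--     return highest_scorers
-- ===== SOURCE B (Python) =====
-- def find_the_highest_scorer(quiz_score):
--     best = 0
--     scorers = []
--     for name, score in quiz_score.items():
--         if score > best:
--             best = score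
--             scorers = [name]
--         elif score == best:
--             scorers.append(name)
--     return scorers
-- ===== Notes on version B (the rewrite author's own statement) =====
-- stated objective: alternative
-- what changed: B replaces A's two passes over the dict (one to find the max, one to collect names) with a single pass that maintains the current best score and the list of its scorers together.
import Mathlib
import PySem

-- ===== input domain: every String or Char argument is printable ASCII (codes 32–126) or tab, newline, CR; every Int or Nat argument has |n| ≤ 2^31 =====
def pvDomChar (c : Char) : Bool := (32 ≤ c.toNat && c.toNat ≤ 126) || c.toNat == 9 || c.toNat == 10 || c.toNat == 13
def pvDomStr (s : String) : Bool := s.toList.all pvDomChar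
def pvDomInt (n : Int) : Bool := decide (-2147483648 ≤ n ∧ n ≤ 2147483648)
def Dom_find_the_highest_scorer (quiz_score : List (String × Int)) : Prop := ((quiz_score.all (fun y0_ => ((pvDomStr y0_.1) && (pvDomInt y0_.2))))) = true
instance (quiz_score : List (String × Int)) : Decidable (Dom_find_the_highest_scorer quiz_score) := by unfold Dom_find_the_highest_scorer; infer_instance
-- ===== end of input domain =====

-- B: one pass maintaining the best score and its scorers together, instead of A's two passes.
-- ===== PORT A =====
def find_the_highest_scorer (quiz_score : List (String × Int)) : List String :=
  let highest_score : Int := quiz_score.foldl (fun h p => if p.2 > h then p.2 else h) 0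
  quiz_score.foldl (fun acc p => if p.2 = highest_score then acc ++ [p.1] else acc) []

-- ===== PORT B =====
def find_the_highest_scorer_alt (quiz_score : List (String × Int)) : List String :=
  (quiz_score.foldl (fun (st : Int × List String) p =>
      if p.2 > st.1 then (p.2, [p.1])
      else if p.2 = st.1 then (st.1, st.2 ++ [p.1])
      else st) (0, [])).2

-- ===== PRECONDITION & SPEC =====
def Spec_find_the_highest_scorer (quiz_score : List (String × Int)) (out : List String) : Prop := out = find_the_highest_scorer_alt quiz_score
instance (quiz_score : List (String × Int)) (out : List String) : Decidable (Spec_find_the_highest_scorer quiz_score out) := by unfold Spec_find_the_highest_scorer; infer_instance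

-- ===== CLAIM (what is proved, stated in full; the proofs are below) =====
def Claim_equal_find_the_highest_scorer : Prop := ∀ (quiz_score : List (String × Int)), Dom_find_the_highest_scorer quiz_score → Spec_find_the_highest_scorer quiz_score (find_the_highest_scorer quiz_score)

-- ===== LEMMAS AND PROOFS =====

def pvStep : Int × List String → (String × Int) → Int × List String :=
  fun st p =>
    if p.2 > st.1 then (p.2, [p.1])
    else if p.2 = st.1 then (st.1, st.2 ++ [p.1])
    else st

def pvMax (qs : List (String × Int)) (b : Int) : Int :=
  qs.foldl (fun h p => if p.2 > h then p.2 else h) b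

def pvCollect (qs : List (String × Int)) (m : Int) (acc : List String) : List String :=
  qs.foldl (fun acc p => if p.2 = m then acc ++ [p.1] else acc) acc

theorem pvMax_le (qs : List (String × Int)) (b : Int) : b ≤ pvMax qs b := by
  induction qs generalizing b with
  | nil => simp [pvMax]
  | cons p qs ih =>
    simp only [pvMax, List.foldl_cons]
    by_cases h : p.2 > b
    · simp only [if_pos h]
      exact le_trans (le_of_lt h) (ih p.2)
    · simp only [if_neg h]; exact ih b

theorem pvCollect_acc (qs : List (String × Int)) (m : Int) (acc : List String) :
    pvCollect qs m acc = acc ++ pvCollect qs m [] := by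
  induction qs generalizing acc with
  | nil => simp [pvCollect]
  | cons p qs ih =>
    show pvCollect qs m (if p.2 = m then acc ++ [p.1] else acc)
        = acc ++ pvCollect qs m (if p.2 = m then [] ++ [p.1] else [])
    by_cases h : p.2 = m
    · simp only [if_pos h, List.nil_append]
      rw [ih (acc ++ [p.1]), ih [p.1]]
      simp
    · simp only [if_neg h]; exact ih acc

theorem pvCollect_cons (p : String × Int) (qs : List (String × Int)) (m : Int) :
    pvCollect (p :: qs) m [] = (if p.2 = m then [p.1] else []) ++ pvCollect qs m [] := by
  show pvCollect qs m (if p.2 = m then [] ++ [p.1] else []) = _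
  by_cases h : p.2 = m
  · simp only [if_pos h, List.nil_append]
    exact pvCollect_acc qs m [p.1]
  · simp [if_neg h]

theorem pvInvariant (qs : List (String × Int)) (b : Int) (acc : List String) :
    qs.foldl pvStep (b, acc) =
      (pvMax qs b, (if pvMax qs b = b then acc else []) ++ pvCollect qs (pvMax qs b) []) := by
  induction qs generalizing b acc with
  | nil => simp [pvMax, pvCollect]
  | cons p qs ih =>
    have hm : pvMax (p :: qs) b = pvMax qs (if p.2 > b then p.2 else b) := by
      simp [pvMax]
    by_cases h1 : p.2 > b
    · have hm' : pvMax (p :: qs) b = pvMax qs p.2 := by rw [hm, if_pos h1]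
      have hle : p.2 ≤ pvMax qs p.2 := pvMax_le qs p.2
      simp only [List.foldl_cons, pvStep, if_pos h1]
      rw [ih p.2 [p.1], hm', pvCollect_cons]
      have hMb : ¬ pvMax qs p.2 = b := by omega
      rw [if_neg hMb]
      by_cases h2 : p.2 = pvMax qs p.2
      · simp [← h2]
      · have h2' : ¬ pvMax qs p.2 = p.2 := fun h => h2 h.symm
        simp [if_neg h2, if_neg h2']
    · have hm' : pvMax (p :: qs) b = pvMax qs b := by rw [hm, if_neg h1]
      have hle : b ≤ pvMax qs b := pvMax_le qs b
      simp only [List.foldl_cons, pvStep, if_neg h1]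
      rw [hm', pvCollect_cons]
      by_cases h2 : p.2 = b
      · simp only [if_pos h2]
        rw [ih b (acc ++ [p.1])]
        by_cases h3 : pvMax qs b = b
        · have : p.2 = pvMax qs b := by omega
          simp [if_pos h3, if_pos this]
        · have : ¬ p.2 = pvMax qs b := by omega
          simp [if_neg h3, if_neg this]
      · simp only [if_neg h2]
        rw [ih b acc]
        have : ¬ p.2 = pvMax qs b := by omega
        simp [if_neg this]

theorem ab_eq (qs : List (String × Int)) :
    find_the_highest_scorer qs = find_the_highest_scorer_alt qs := by
  show pvCollect qs (pvMax qs 0) [] = (qs.foldl pvStep (0, [])).2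
  rw [pvInvariant qs 0 []]
  simp

-- ===== VERDICT (by name: the statement is the Claim_ definition above) =====
theorem find_the_highest_scorer_spec : Claim_equal_find_the_highest_scorer := by
  intro qs _
  exact ab_eq qs
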